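-- pv_equiv track=rewrite | github.com/ODuqueDvise/actividad4_aplicaciones1_mia | src/mortalidad/callbacks.py | _sanitize_months
-- ===== SOURCE A (Python) =====
-- from collections.abc import Callable, Iterable
--
-- def _sanitize_months(months: Iterable[int] | None) -> tuple[int, int]:
--     if not months:
--         return (1, 12)
--     values = sorted(int(m) for m in months)
--     start, end = values[0], values[-1]
--     if start > end:
--         start, end = end, start
--     return (max(1, start), min(12, end))
-- ===== SOURCE B (Python) =====
-- def _sanitize_months(months):
--     if not months:
--         return (1, 12)
--     values = [int(m) for m in months]
--     lo = hi = values[0]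
--     for v in values[1:]:
--         if v < lo:
--             lo = v
--         if v > hi:
--             hi = v
--     return (max(1, lo), min(12, hi))
-- ===== Notes on version B (the rewrite author's own statement) =====
-- stated objective: alternative
-- what changed: Replaces sorting plus first/last indexing (and the dead start>end swap) with a single linear min/max scan seeded from the first element.
import Mathlib
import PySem

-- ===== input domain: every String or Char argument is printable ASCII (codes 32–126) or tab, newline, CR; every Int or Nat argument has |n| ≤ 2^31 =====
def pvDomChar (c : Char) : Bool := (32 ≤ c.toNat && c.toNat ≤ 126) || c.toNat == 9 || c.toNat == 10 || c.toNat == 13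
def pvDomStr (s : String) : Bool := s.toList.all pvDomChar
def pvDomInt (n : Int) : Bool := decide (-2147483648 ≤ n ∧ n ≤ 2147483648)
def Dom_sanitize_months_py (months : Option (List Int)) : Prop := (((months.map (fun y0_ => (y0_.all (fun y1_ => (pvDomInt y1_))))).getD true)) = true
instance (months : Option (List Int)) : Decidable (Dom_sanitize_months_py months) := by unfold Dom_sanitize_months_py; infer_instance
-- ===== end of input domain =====

-- B replaces A's sort-then-index (and A's unreachable start>end swap) with one linear min/max scan.

-- ===== PORT A =====
-- literal port of A: falsy guard, sorted(...), values[0]/values[-1], dead swap, clamp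
def sanitize_months_py (months : Option (List Int)) : Int × Int :=
  match months with
  | none => (1, 12)
  | some ms =>
    if ms = [] then (1, 12)
    else
      let values := PySem.List.sorted ms (fun x => x) false   -- int(m) is the identity on ints
      let start := PySem.List.pyGetD values 0 0               -- values[0]; in range since ms ≠ []
      let end_ := PySem.List.pyGetD values (-1) 0             -- values[-1]; in range since ms ≠ []
      let p := if start > end_ then (end_, start) else (start, end_)
      (max 1 p.1, min 12 p.2)

-- ===== PORT B =====
-- literal port of B: seed lo = hi = values[0], scan the rest updating lo/hi
def sanitize_months_py_alt (months : Option (List Int)) : Int × Int :=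
  match months with
  | none => (1, 12)
  | some [] => (1, 12)
  | some (v :: rest) =>
    let p := rest.foldl
      (fun (p : Int × Int) x =>
        (if x < p.1 then x else p.1, if x > p.2 then x else p.2)) (v, v)
    (max 1 p.1, min 12 p.2)

-- ===== PRECONDITION & SPEC =====
def Spec_sanitize_months_py (months : Option (List Int)) (out : Int × Int) : Prop := out = sanitize_months_py_alt months
instance (months : Option (List Int)) (out : Int × Int) : Decidable (Spec_sanitize_months_py months out) := by unfold Spec_sanitize_months_py; infer_instance

-- ===== CLAIM (what is proved, stated in full; the proofs are below) =====
def Claim_equal_sanitize_months_py : Prop := ∀ (months : Option (List Int)), Dom_sanitize_months_py months → Spec_sanitize_months_py months (sanitize_months_py months)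

-- ===== LEMMAS AND PROOFS =====

-- foldl min is a lower bound of the seed and all scanned elements, and is one of them
theorem foldl_min_le (l : List Int) (v : Int) :
    l.foldl min v ≤ v ∧ ∀ x ∈ l, l.foldl min v ≤ x := by
  induction l generalizing v with
  | nil => simp
  | cons y t ih =>
    obtain ⟨h1, h2⟩ := ih (min v y)
    refine ⟨le_trans h1 (min_le_left _ _), ?_⟩
    intro x hx
    rcases List.mem_cons.mp hx with rfl | hx
    · exact le_trans h1 (min_le_right _ _)
    · exact h2 x hx

theorem foldl_min_mem (l : List Int) (v : Int) : l.foldl min v ∈ v :: l := by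
  induction l generalizing v with
  | nil => simp
  | cons y t ih =>
    have hm := ih (min v y)
    rw [List.foldl_cons]
    rcases List.mem_cons.mp hm with h | h
    · rw [h]
      rcases min_choice v y with h' | h' <;> simp [h']
    · exact List.mem_cons.mpr (Or.inr (List.mem_cons.mpr (Or.inr h)))

theorem foldl_max_ge (l : List Int) (v : Int) :
    v ≤ l.foldl max v ∧ ∀ x ∈ l, x ≤ l.foldl max v := by
  induction l generalizing v with
  | nil => simp
  | cons y t ih =>
    obtain ⟨h1, h2⟩ := ih (max v y)
    refine ⟨le_trans (le_max_left _ _) h1, ?_⟩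
    intro x hx
    rcases List.mem_cons.mp hx with rfl | hx
    · exact le_trans (le_max_right _ _) h1
    · exact h2 x hx

theorem foldl_max_mem (l : List Int) (v : Int) : l.foldl max v ∈ v :: l := by
  induction l generalizing v with
  | nil => simp
  | cons y t ih =>
    have hm := ih (max v y)
    rw [List.foldl_cons]
    rcases List.mem_cons.mp hm with h | h
    · rw [h]
      rcases max_choice v y with h' | h' <;> simp [h']
    · exact List.mem_cons.mpr (Or.inr (List.mem_cons.mpr (Or.inr h)))

-- B's paired fold is (foldl min, foldl max)
theorem foldl_pair_eq (l : List Int) (a b : Int) :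
    l.foldl (fun (p : Int × Int) x =>
      (if x < p.1 then x else p.1, if x > p.2 then x else p.2)) (a, b)
    = (l.foldl min a, l.foldl max b) := by
  induction l generalizing a b with
  | nil => rfl
  | cons y t ih =>
    simp only [List.foldl_cons]
    rw [ih]
    have h1 : (if y < a then y else a) = min a y := by split_ifs with h <;> omega
    have h2 : (if y > b then y else b) = max b y := by split_ifs with h <;> omega
    rw [h1, h2]

-- the head of the sort is the running minimum
theorem sorted_head_eq_min (v : Int) (rest : List Int) :
    PySem.List.pyGetD (PySem.List.sorted (v :: rest) (fun x => x) false) 0 0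
      = rest.foldl min v := by
  have hne : PySem.List.sorted (v :: rest) (fun x => x) false ≠ [] := by
    simp [PySem.List.sorted_eq_nil_iff]
  obtain ⟨m, t, hs⟩ := List.exists_cons_of_ne_nil hne
  have hmem : m ∈ v :: rest := by
    rw [← PySem.List.mem_sorted (v :: rest) (fun x => x) false, hs]
    exact List.mem_cons_self
  have hle : ∀ y ∈ (v :: rest), m ≤ y := PySem.List.key_head_sorted_le _ (fun x => x) hs
  have h1 : m ≤ rest.foldl min v := hle _ (foldl_min_mem rest v)
  have h2 : rest.foldl min v ≤ m := by
    rcases List.mem_cons.mp hmem with rfl | hm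
    · exact (foldl_min_le rest m).1
    · exact (foldl_min_le rest v).2 m hm
  rw [hs]
  simp [PySem.List.pyGetD, PySem.List.pyGet?, PySem.List.pyIdx?]
  omega

-- the last element of the sort is the running maximum
theorem sorted_last_eq_max (v : Int) (rest : List Int) :
    PySem.List.pyGetD (PySem.List.sorted (v :: rest) (fun x => x) false) (-1) 0
      = rest.foldl max v := by
  have hlen : (PySem.List.sorted (v :: rest) (fun x => x) false).length = rest.length + 1 := by
    rw [PySem.List.length_sorted]; rfl
  have hget : PySem.List.pyGetD (PySem.List.sorted (v :: rest) (fun x => x) false) (-1) 0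
      = (PySem.List.sorted (v :: rest) (fun x => x) false)[rest.length]'(by omega) := by
    simp [PySem.List.pyGetD, PySem.List.pyGet?, PySem.List.pyIdx?, hlen]
  have hMmem : (PySem.List.sorted (v :: rest) (fun x => x) false)[rest.length]'(by omega)
      ∈ v :: rest := by
    rw [← PySem.List.mem_sorted (v :: rest) (fun x => x) false]
    exact List.getElem_mem _
  have hge : ∀ y ∈ (v :: rest),
      y ≤ (PySem.List.sorted (v :: rest) (fun x => x) false)[rest.length]'(by omega) := by
    intro y hy
    have hy' : y ∈ PySem.List.sorted (v :: rest) (fun x => x) false :=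
      (PySem.List.mem_sorted (v :: rest) (fun x => x) false y).mpr hy
    obtain ⟨p, hp, hyp⟩ := List.mem_iff_getElem.mp hy'
    have := PySem.List.sorted_id_getElem_mono (v :: rest)
      (p := p) (q := rest.length) (by omega) (by omega)
    omega
  have h1 : rest.foldl max v
      ≤ (PySem.List.sorted (v :: rest) (fun x => x) false)[rest.length]'(by omega) :=
    hge _ (foldl_max_mem rest v)
  have h2 : (PySem.List.sorted (v :: rest) (fun x => x) false)[rest.length]'(by omega)
      ≤ rest.foldl max v := by
    rcases List.mem_cons.mp hMmem with heq | hm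
    · rw [heq]; exact (foldl_max_ge rest v).1
    · exact (foldl_max_ge rest v).2 _ hm
  omega

-- ===== VERDICT (by name: the statement is the Claim_ definition above) =====
theorem sanitize_months_py_spec : Claim_equal_sanitize_months_py := by
  intro months _
  unfold Spec_sanitize_months_py
  match months with
  | none => rfl
  | some [] => rfl
  | some (v :: rest) =>
    have hmin := sorted_head_eq_min v rest
    have hmax := sorted_last_eq_max v rest
    have hle : rest.foldl min v ≤ rest.foldl max v :=
      le_trans (foldl_min_le rest v).1 (foldl_max_ge rest v).1
    simp only [sanitize_months_py, sanitize_months_py_alt, foldl_pair_eq]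
    simp only [hmin, hmax]
    rw [if_neg (not_lt.mpr hle)]
    simp
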